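-- pv_equiv track=rewrite | github.com/benquick123/code-profiling | code/batch-2/vse-naloge-brez-testov/DN7-M-050.py | varen_premik
-- ===== SOURCE A (Python) =====
-- def je_mina(x,y, mine):
--     t = (x,y)
--     if t in mine:
--         return True
--
--     else:
--         return False
--
-- def varen_premik(x0, y0, x1, y1, mine):
--
--     if(x0<=x1):
--
--         for premik_x in range(x0, x1 + 1):
--
--             if je_mina(premik_x, y0, mine):
--
--                 return False
--
--
--         if (y0 > y1):
--             b = y1
--             y1 = y0
--             y0 = b
--             for premik_y in range(y0, y1 + 1):
--                 if je_mina(x1, premik_y, mine):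
--
--                     return False
--         else:
--             for premik_y in range(y0, y1 + 1):
--
--                 if je_mina(x1, premik_y, mine):
--
--                     return False
--         return True
--
--     if( x0>=x1):
--         a=x1
--         x1=x0
--         x0=a
--
--         for premik_x in range(x0, x1 + 1):
--
--             if je_mina(premik_x, y0, mine):
--
--                 return False
--         if(y0>y1):
--             b = y1
--             y1 = y0
--             y0 = b
--             for premik_y in range(y0, y1 + 1):
--
--                 if je_mina(x1, premik_y, mine):
--                     return False
--     return True
-- ===== SOURCE B (Python) =====
-- def varen_premik(x0, y0, x1, y1, mine):
--     return not any(
--         (y == y0 and min(x0, x1) <= x <= max(x0, x1)) or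
--         (x == x1 and min(y0, y1) <= y <= max(y0, y1))
--         for (x, y) in mine)
-- ===== Notes on version B (the rewrite author's own statement) =====
-- stated objective: faster
-- what changed: Instead of walking every lattice cell of the L-shaped path and testing each for membership in mine, B makes one pass over the mines and tests each mine geometrically against the horizontal and vertical segments of the path.
-- intended difference: When x0 > x1, A checks the vertical leg at the start column x0 (a stale variable after its swap) and skips it entirely when y0 <= y1, so A returns True despite a mine on the real vertical leg at x1 (and False for a harmless mine at column x0); B checks the intended leg at the destination column x1, which is what the function is for. — e.g. on varen_premik(1, 0, 0, 1, [(0, 1)]): A returns true, B returns false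
import Mathlib
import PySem

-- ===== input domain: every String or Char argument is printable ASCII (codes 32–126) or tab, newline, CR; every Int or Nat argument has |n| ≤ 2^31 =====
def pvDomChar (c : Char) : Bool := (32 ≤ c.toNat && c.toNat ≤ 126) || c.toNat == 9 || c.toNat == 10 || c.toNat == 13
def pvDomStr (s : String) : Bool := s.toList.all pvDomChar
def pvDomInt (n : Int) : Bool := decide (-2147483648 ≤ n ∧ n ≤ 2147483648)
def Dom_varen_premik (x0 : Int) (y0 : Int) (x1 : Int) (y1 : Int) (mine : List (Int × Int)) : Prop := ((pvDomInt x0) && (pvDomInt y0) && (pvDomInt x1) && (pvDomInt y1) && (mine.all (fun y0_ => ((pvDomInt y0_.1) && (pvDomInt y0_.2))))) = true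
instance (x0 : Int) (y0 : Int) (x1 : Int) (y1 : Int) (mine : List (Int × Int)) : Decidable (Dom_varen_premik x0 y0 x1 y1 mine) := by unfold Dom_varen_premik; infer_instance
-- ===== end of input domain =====

-- B iterates once over the mines, testing each mine geometrically against the two segments of
-- the L-shaped path, instead of A's walk over every lattice cell of the path; B also fixes A's
-- stale-variable bug on x0 > x1 (see D_varen_premik below).

-- ===== PORT A =====
def je_mina (x : Int) (y : Int) (mine : List (Int × Int)) : Bool :=
  if mine.contains (x, y) then true else false

def varen_premik (x0 : Int) (y0 : Int) (x1 : Int) (y1 : Int) (mine : List (Int × Int)) : Bool :=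
  if x0 ≤ x1 then
    -- for premik_x in range(x0, x1+1): return False on a mine
    if (PySem.List.pyRange x0 (x1 + 1) 1).any (fun px => je_mina px y0 mine) then false
    else if y0 > y1 then
      -- swap y0/y1, then scan the column at x1
      if (PySem.List.pyRange y1 (y0 + 1) 1).any (fun py => je_mina x1 py mine) then false else true
    else
      if (PySem.List.pyRange y0 (y1 + 1) 1).any (fun py => je_mina x1 py mine) then false else true
  else
    -- x0 > x1: swap x0/x1 (so the Python's x1 now holds the original x0)
    if (PySem.List.pyRange x1 (x0 + 1) 1).any (fun px => je_mina px y0 mine) then false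
    else if y0 > y1 then
      -- swap y0/y1, then scan the column at the Python's x1 = original x0
      if (PySem.List.pyRange y1 (y0 + 1) 1).any (fun py => je_mina x0 py mine) then false else true
    else true

-- ===== PORT B =====
def varen_premik_alt (x0 : Int) (y0 : Int) (x1 : Int) (y1 : Int) (mine : List (Int × Int)) : Bool :=
  !(mine.any (fun m =>
      (decide (m.2 = y0) && decide (min x0 x1 ≤ m.1) && decide (m.1 ≤ max x0 x1)) ||
      (decide (m.1 = x1) && decide (min y0 y1 ≤ m.2) && decide (m.2 ≤ max y0 y1))))

-- ===== PRECONDITION & SPEC =====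
-- When x0 > x1, A scans the vertical leg at the stale column x0 (and skips it when y0 ≤ y1),
-- so A answers for the wrong column while B checks the intended destination column x1.
def D_varen_premik (x0 : Int) (y0 : Int) (x1 : Int) (y1 : Int) (mine : List (Int × Int)) : Prop :=
  x0 > x1 ∧
  ¬ (∃ m ∈ mine, m.2 = y0 ∧ x1 ≤ m.1 ∧ m.1 ≤ x0) ∧
  ¬ ((y0 > y1 ∧ ∃ m ∈ mine, m.1 = x0 ∧ y1 ≤ m.2 ∧ m.2 ≤ y0) ↔
     (∃ m ∈ mine, m.1 = x1 ∧ min y0 y1 ≤ m.2 ∧ m.2 ≤ max y0 y1))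
instance (x0 : Int) (y0 : Int) (x1 : Int) (y1 : Int) (mine : List (Int × Int)) : Decidable (D_varen_premik x0 y0 x1 y1 mine) := by unfold D_varen_premik; infer_instance

def Spec_varen_premik (x0 : Int) (y0 : Int) (x1 : Int) (y1 : Int) (mine : List (Int × Int)) (out : Bool) : Prop := ¬ D_varen_premik x0 y0 x1 y1 mine → out = varen_premik_alt x0 y0 x1 y1 mine
instance (x0 : Int) (y0 : Int) (x1 : Int) (y1 : Int) (mine : List (Int × Int)) (out : Bool) : Decidable (Spec_varen_premik x0 y0 x1 y1 mine out) := by unfold Spec_varen_premik; infer_instance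

def pvDiffWitness_varen_premik : Int × Int × Int × Int × (List (Int × Int)) := (1, 0, 0, 1, [(0, 1)])
def pvDiffWitnessOut_varen_premik : Bool × Bool := (true, false)

-- ===== CLAIM (what is proved, stated in full; the proofs are below) =====
def Claim_unchanged_varen_premik : Prop := ∀ (x0 : Int) (y0 : Int) (x1 : Int) (y1 : Int) (mine : List (Int × Int)), Dom_varen_premik x0 y0 x1 y1 mine → Spec_varen_premik x0 y0 x1 y1 mine (varen_premik x0 y0 x1 y1 mine)
def Claim_changed_varen_premik : Prop := Dom_varen_premik (pvDiffWitness_varen_premik.1) (pvDiffWitness_varen_premik.2.1) (pvDiffWitness_varen_premik.2.2.1) (pvDiffWitness_varen_premik.2.2.2.1) (pvDiffWitness_varen_premik.2.2.2.2) ∧ D_varen_premik (pvDiffWitness_varen_premik.1) (pvDiffWitness_varen_premik.2.1) (pvDiffWitness_varen_premik.2.2.1) (pvDiffWitness_varen_premik.2.2.2.1) (pvDiffWitness_varen_premik.2.2.2.2) ∧ varen_premik (pvDiffWitness_varen_premik.1) (pvDiffWitness_varen_premik.2.1) (pvDiffWitness_varen_premik.2.2.1) (pvDiffWitness_varen_premik.2.2.2.1)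 (pvDiffWitness_varen_premik.2.2.2.2) = pvDiffWitnessOut_varen_premik.1 ∧ varen_premik_alt (pvDiffWitness_varen_premik.1) (pvDiffWitness_varen_premik.2.1) (pvDiffWitness_varen_premik.2.2.1) (pvDiffWitness_varen_premik.2.2.2.1) (pvDiffWitness_varen_premik.2.2.2.2) = pvDiffWitnessOut_varen_premik.2 ∧ pvDiffWitnessOut_varen_premik.1 ≠ pvDiffWitnessOut_varen_premik.2
def Claim_exact_varen_premik : Prop := ∀ (x0 : Int) (y0 : Int) (x1 : Int) (y1 : Int) (mine : List (Int × Int)), Dom_varen_premik x0 y0 x1 y1 mine → D_varen_premik x0 y0 x1 y1 mine → varen_premik x0 y0 x1 y1 mine ≠ varen_premik_alt x0 y0 x1 y1 mine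

-- ===== LEMMAS AND PROOFS =====

theorem je_mina_T (x : Int) (y : Int) (mine : List (Int × Int)) :
    (je_mina x y mine = true) ↔ (x, y) ∈ mine := by
  unfold je_mina
  split_ifs with h
  · simp only [List.contains_iff_mem] at h
    simpa using h
  · simp only [List.contains_iff_mem] at h
    simpa using h

-- horizontal scan = "some mine on row y between a and b"
theorem anyH (a b y : Int) (mine : List (Int × Int)) :
    ((PySem.List.pyRange a (b + 1) 1).any (fun px => je_mina px y mine) = true)
      ↔ ∃ m ∈ mine, m.2 = y ∧ a ≤ m.1 ∧ m.1 ≤ b := by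
  simp only [List.any_eq_true, PySem.List.mem_pyRange_one, je_mina_T]
  constructor
  · rintro ⟨px, ⟨h1, h2⟩, hmem⟩
    exact ⟨(px, y), hmem, rfl, h1, by omega⟩
  · rintro ⟨⟨mx, my⟩, hmem, h1, h2, h3⟩
    exact ⟨mx, ⟨h2, by omega⟩, h1 ▸ hmem⟩

-- vertical scan = "some mine in column x between a and b"
theorem anyV (a b x : Int) (mine : List (Int × Int)) :
    ((PySem.List.pyRange a (b + 1) 1).any (fun py => je_mina x py mine) = true)
      ↔ ∃ m ∈ mine, m.1 = x ∧ a ≤ m.2 ∧ m.2 ≤ b := by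
  simp only [List.any_eq_true, PySem.List.mem_pyRange_one, je_mina_T]
  constructor
  · rintro ⟨py, ⟨h1, h2⟩, hmem⟩
    exact ⟨(x, py), hmem, rfl, h1, by omega⟩
  · rintro ⟨⟨mx, my⟩, hmem, h1, h2, h3⟩
    exact ⟨my, ⟨h2, by omega⟩, h1 ▸ hmem⟩

theorem altT (x0 y0 x1 y1 : Int) (mine : List (Int × Int)) :
    (varen_premik_alt x0 y0 x1 y1 mine = true)
      ↔ ¬ ((∃ m ∈ mine, m.2 = y0 ∧ min x0 x1 ≤ m.1 ∧ m.1 ≤ max x0 x1) ∨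
           (∃ m ∈ mine, m.1 = x1 ∧ min y0 y1 ≤ m.2 ∧ m.2 ≤ max y0 y1)) := by
  have hp : ∀ m : Int × Int,
      (((decide (m.2 = y0) && decide (min x0 x1 ≤ m.1) && decide (m.1 ≤ max x0 x1)) ||
        (decide (m.1 = x1) && decide (min y0 y1 ≤ m.2) && decide (m.2 ≤ max y0 y1))) = true)
      ↔ ((m.2 = y0 ∧ min x0 x1 ≤ m.1 ∧ m.1 ≤ max x0 x1) ∨
         (m.1 = x1 ∧ min y0 y1 ≤ m.2 ∧ m.2 ≤ max y0 y1)) := by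
    intro m
    simp [and_assoc]
  simp only [varen_premik_alt, Bool.not_eq_true', List.any_eq_false]
  constructor
  · intro h
    rintro (⟨m, hm, hc⟩ | ⟨m, hm, hc⟩)
    · exact (h m hm) ((hp m).2 (Or.inl hc))
    · exact (h m hm) ((hp m).2 (Or.inr hc))
  · intro h m hm hpm
    rcases (hp m).1 hpm with hc | hc
    · exact h (Or.inl ⟨m, hm, hc⟩)
    · exact h (Or.inr ⟨m, hm, hc⟩)

theorem varen_premik_spec : Claim_unchanged_varen_premik := by
  intro x0 y0 x1 y1 mine _ hD
  unfold D_varen_premik at hD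
  rw [Bool.eq_iff_iff]
  unfold varen_premik
  split_ifs with hx h1 hy h2 h3 h1' hy' h2'
  · -- x0 ≤ x1, horizontal mine found
    simp only [Bool.false_eq_true, false_iff]
    rw [altT]
    push_neg
    obtain ⟨m, hm, ha, hb, hc⟩ := (anyH _ _ _ _).1 h1
    exact Or.inl ⟨m, hm, ha, by omega, by omega⟩
  · -- x0 ≤ x1, y0 > y1, vertical mine found
    simp only [Bool.false_eq_true, false_iff]
    rw [altT]
    push_neg
    obtain ⟨m, hm, ha, hb, hc⟩ := (anyV _ _ _ _).1 h2
    exact Or.inr ⟨m, hm, ha, by omega, by omega⟩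
  · -- x0 ≤ x1, y0 > y1, clean
    simp only [true_iff]
    rw [altT]
    rw [anyH] at h1
    rw [anyV] at h2
    rintro (⟨m, hm, ha, hb, hc⟩ | ⟨m, hm, ha, hb, hc⟩)
    · exact h1 ⟨m, hm, ha, by omega, by omega⟩
    · exact h2 ⟨m, hm, ha, by omega, by omega⟩
  · -- x0 ≤ x1, y0 ≤ y1, vertical mine found
    simp only [Bool.false_eq_true, false_iff]
    rw [altT]
    push_neg
    obtain ⟨m, hm, ha, hb, hc⟩ := (anyV _ _ _ _).1 h3
    exact Or.inr ⟨m, hm, ha, by omega, by omega⟩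
  · -- x0 ≤ x1, y0 ≤ y1, clean
    simp only [true_iff]
    rw [altT]
    rw [anyH] at h1
    rw [anyV] at h3
    rintro (⟨m, hm, ha, hb, hc⟩ | ⟨m, hm, ha, hb, hc⟩)
    · exact h1 ⟨m, hm, ha, by omega, by omega⟩
    · exact h3 ⟨m, hm, ha, by omega, by omega⟩
  · -- x0 > x1, horizontal mine found
    simp only [Bool.false_eq_true, false_iff]
    rw [altT]
    push_neg
    obtain ⟨m, hm, ha, hb, hc⟩ := (anyH _ _ _ _).1 h1'
    exact Or.inl ⟨m, hm, ha, by omega, by omega⟩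
  · -- x0 > x1, y0 > y1, vertical mine at stale column x0: ¬D gives a mine at x1 too
    simp only [Bool.false_eq_true, false_iff]
    rw [altT]
    push_neg
    rw [anyH] at h1'
    rw [anyV] at h2'
    right
    by_contra hV
    exact hD ⟨by omega, h1', fun hiff => hV (hiff.1 ⟨hy', h2'⟩)⟩
  · -- x0 > x1, y0 > y1, stale column clean: ¬D gives no mine at x1 either
    simp only [true_iff]
    rw [altT]
    rw [anyH] at h1'
    rw [anyV] at h2'
    have hV : ¬ ∃ m ∈ mine, m.1 = x1 ∧ min y0 y1 ≤ m.2 ∧ m.2 ≤ max y0 y1 := by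
      intro hV
      exact hD ⟨by omega, h1', fun hiff => h2' (hiff.2 hV).2⟩
    rintro (⟨m, hm, ha, hb, hc⟩ | hvv)
    · exact h1' ⟨m, hm, ha, by omega, by omega⟩
    · exact hV hvv
  · -- x0 > x1, y0 ≤ y1: A skips the vertical leg; ¬D gives no mine at x1
    simp only [true_iff]
    rw [altT]
    rw [anyH] at h1'
    have hV : ¬ ∃ m ∈ mine, m.1 = x1 ∧ min y0 y1 ≤ m.2 ∧ m.2 ≤ max y0 y1 := by
      intro hV
      exact hD ⟨by omega, h1', fun hiff => hy' (hiff.2 hV).1⟩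
    rintro (⟨m, hm, ha, hb, hc⟩ | hvv)
    · exact h1' ⟨m, hm, ha, by omega, by omega⟩
    · exact hV hvv

theorem varen_premik_changed : Claim_changed_varen_premik := by
  unfold Claim_changed_varen_premik; decide

theorem varen_premik_tight : Claim_exact_varen_premik := by
  intro x0 y0 x1 y1 mine _ hDd
  obtain ⟨hx, hH, hI⟩ := hDd
  have hhf : ¬ (((PySem.List.pyRange x1 (x0 + 1) 1).any fun px => je_mina px y0 mine) = true) :=
    fun h => hH ((anyH _ _ _ _).1 h)
  have hA : varen_premik x0 y0 x1 y1 mine = true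
      ↔ ¬ (y0 > y1 ∧ ∃ m ∈ mine, m.1 = x0 ∧ y1 ≤ m.2 ∧ m.2 ≤ y0) := by
    unfold varen_premik
    rw [if_neg (by omega : ¬ x0 ≤ x1), if_neg hhf]
    by_cases hy : y0 > y1
    · rw [if_pos hy]
      by_cases hv : ∃ m ∈ mine, m.1 = x0 ∧ y1 ≤ m.2 ∧ m.2 ≤ y0
      · rw [if_pos ((anyV _ _ _ _).2 hv)]
        simp [hy, hv]
      · rw [if_neg (fun h => hv ((anyV _ _ _ _).1 h))]
        simp [hv]
    · rw [if_neg hy]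
      simp [hy]
  have hB : varen_premik_alt x0 y0 x1 y1 mine = true
      ↔ ¬ ∃ m ∈ mine, m.1 = x1 ∧ min y0 y1 ≤ m.2 ∧ m.2 ≤ max y0 y1 := by
    rw [altT]
    constructor
    · intro h hv
      exact h (Or.inr hv)
    · rintro h (⟨m, hm, ha, hb, hc⟩ | hv)
      · exact hH ⟨m, hm, ha, by omega, by omega⟩
      · exact h hv
  intro heq
  apply hI
  constructor
  · intro hAver
    by_contra hV
    have ht : varen_premik_alt x0 y0 x1 y1 mine = true := hB.2 hV
    rw [← heq] at ht
    exact (hA.1 ht) hAver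
  · intro hV
    by_contra hAver
    have ht : varen_premik x0 y0 x1 y1 mine = true := hA.2 hAver
    rw [heq] at ht
    exact (hB.1 ht) hV

-- ===== VERDICT =====
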